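-- pv_equiv track=rewrite | github.com/OmarJr11/link-layer | services/bits_service.py | removeFillerBits
-- ===== SOURCE A (Python) =====
-- def removeFillerBits(code):
--     if not code:
--         return False
--     else:
--         bits1 = 0  # Contador de bits 1
--         newCode = ''  # Nuevo codigo sin bandera
--         for bit in code:
--             # si no he conseguido los 5 bit 1 seguido
--             if bit == '1' and bits1 < 5:
--                 # Se copia el bit y se aumenta el contador de bits 1
--                 newCode = newCode + bit
--                 bits1 = bits1 + 1
--             elif bits1 == 5:
--                 # si ya hay 5 bits 1 seguido, no se copia el bit porque seria la bandera
--                 bits1 = 0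
--             else:
--                 # si es 0 se reinicia el conteo de bits 1 y se copia el bit
--                 bits1 = 0
--                 newCode = newCode + bit
--         return newCode
-- ===== SOURCE B (Python) =====
-- def removeFillerBits(code):
--     if not code:
--         return False
--     chunks = []
--     i = 0
--     n = len(code)
--     while i < n:
--         if code[i:i+5] == '11111':
--             chunks.append('11111')
--             i += 6
--         else:
--             chunks.append(code[i])
--             i += 1
--     return ''.join(chunks)
-- ===== Notes on version B (the rewrite author's own statement) =====
-- stated objective: alternative
-- what changed: Replaced the per-character counter state machine with a pattern-based scan that compares a 5-character slice '11111' and skips the following stuffed bit, collecting chunks and joining once instead of repeated string concatenation.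
-- outside the precondition, e.g. on removeFillerBits(''): A returns False, B returns False
import Mathlib
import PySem

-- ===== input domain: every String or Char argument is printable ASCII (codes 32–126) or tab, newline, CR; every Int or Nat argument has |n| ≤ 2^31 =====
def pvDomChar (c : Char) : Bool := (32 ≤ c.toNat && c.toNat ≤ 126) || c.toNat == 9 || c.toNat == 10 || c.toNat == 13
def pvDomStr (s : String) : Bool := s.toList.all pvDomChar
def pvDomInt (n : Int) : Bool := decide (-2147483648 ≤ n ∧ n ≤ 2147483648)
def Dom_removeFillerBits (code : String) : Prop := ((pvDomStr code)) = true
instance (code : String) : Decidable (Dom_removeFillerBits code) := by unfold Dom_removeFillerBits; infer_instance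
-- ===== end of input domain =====

-- B replaces A's per-character counter state machine by a pattern-based scan that
-- matches a 5-character slice '11111' and skips the bit that follows (objective: alternative).

-- ===== PORT A =====
-- the for-loop over `code` with state (bits1, newCode), branches in source order
def aLoop : Int → List Char → List Char → List Char
  | _, newCode, [] => newCode
  | bits1, newCode, b :: rest =>
    if b = '1' ∧ bits1 < 5 then aLoop (bits1 + 1) (newCode ++ [b]) rest
    else if bits1 = 5 then aLoop 0 newCode rest
    else aLoop 0 (newCode ++ [b]) rest

def removeFillerBits (code : String) : String :=
  String.mk (aLoop 0 [] code.toList)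

-- ===== PORT B =====
-- Source B's while loop over index i: compare the 5-slice at i with '11111'; on a match
-- emit '11111' and advance by 6, otherwise emit one character and advance by 1.
def bGo : List Char → List Char
  | [] => []
  | c :: cs =>
    if (c :: cs).take 5 = ['1', '1', '1', '1', '1'] then
      ['1', '1', '1', '1', '1'] ++ bGo (cs.drop 5)
    else
      c :: bGo cs
termination_by l => l.length
decreasing_by
  all_goals simp

def removeFillerBits_alt (code : String) : String :=
  String.mk (bGo code.toList)

-- ===== PRECONDITION & SPEC =====
-- Pre_ excludes only the empty string, on which A's guard returns the bool False,
-- a value outside the declared str return type (B keeps the same guard).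
def Pre_removeFillerBits (code : String) : Prop := code ≠ ""
instance (code : String) : Decidable (Pre_removeFillerBits code) := by
  unfold Pre_removeFillerBits; infer_instance

def pvWitness_removeFillerBits : String := "01111101"

def Spec_removeFillerBits (code : String) (out : String) : Prop := out = removeFillerBits_alt code
instance (code : String) (out : String) : Decidable (Spec_removeFillerBits code out) := by
  unfold Spec_removeFillerBits; infer_instance

-- ===== CLAIM (what is proved, stated in full; the proofs are below) =====
def Claim_equal_removeFillerBits : Prop := ∀ (code : String), Dom_removeFillerBits code → Pre_removeFillerBits code → Spec_removeFillerBits code (removeFillerBits code)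

-- ===== LEMMAS AND PROOFS =====

-- A's loop in accumulator-free form
lemma aLoop_acc (l : List Char) : ∀ (b : Int) (acc : List Char),
    aLoop b acc l = acc ++ aLoop b [] l := by
  induction l with
  | nil => intro b acc; simp [aLoop]
  | cons x rest ih =>
    intro b acc
    simp only [aLoop]
    split_ifs with h1 h2
    · rw [ih, ih (b + 1) ([] ++ [x])]; simp
    · rw [ih, ih 0 []]
    · rw [ih, ih 0 ([] ++ [x])]; simp

-- a short prefix of ones followed by a non-'1' char is never 'take m = replicate m '1''
lemma take_ne_ones : ∀ (k m : Nat) (c : Char) (cs : List Char), c ≠ '1' → k < m →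
    (List.replicate k '1' ++ c :: cs).take m ≠ List.replicate m '1' := by
  intro k
  induction k with
  | zero =>
    intro m c cs hc hm
    cases m with
    | zero => omega
    | succ m' => simp [List.replicate, hc]
  | succ k' ih =>
    intro m c cs hc hm
    cases m with
    | zero => omega
    | succ m' =>
      simp only [List.replicate_succ, List.cons_append, List.take_succ_cons]
      intro h
      injection h with _ h2
      exact ih m' c cs hc (by omega) h2

lemma bGo_ones_nonone (k : Nat) (hk : k ≤ 4) (c : Char) (hc : c ≠ '1') (cs : List Char) :
    bGo (List.replicate k '1' ++ c :: cs) = List.replicate k '1' ++ c :: bGo cs := by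
  induction k with
  | zero =>
    rw [List.replicate_zero, List.nil_append, bGo,
      if_neg (show ¬List.take 5 (c :: cs) = ['1', '1', '1', '1', '1'] from
        take_ne_ones 0 5 c cs hc (by omega))]
    simp
  | succ k' ih =>
    rw [List.replicate_succ, List.cons_append, bGo,
      if_neg (show ¬List.take 5 ('1' :: (List.replicate k' '1' ++ c :: cs)) =
          ['1', '1', '1', '1', '1'] from take_ne_ones (k' + 1) 5 c cs hc (by omega))]
    rw [ih (by omega)]
    simp

lemma bGo_short_ones (k : Nat) (hk : k ≤ 4) :
    bGo (List.replicate k '1') = List.replicate k '1' := by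
  interval_cases k <;> simp [bGo, List.replicate]

lemma main_lemma : ∀ (n : Nat) (l : List Char), l.length ≤ n → ∀ k : Nat, k ≤ 4 →
    List.replicate k '1' ++ aLoop (k : Int) [] l = bGo (List.replicate k '1' ++ l) := by
  intro n
  induction n with
  | zero =>
    intro l hl k hk
    have : l = [] := List.eq_nil_of_length_eq_zero (by omega)
    subst this
    simp [aLoop, bGo_short_ones k hk]
  | succ n ih =>
    intro l hl k hk
    cases l with
    | nil => simp [aLoop, bGo_short_ones k hk]
    | cons x rest =>
      by_cases hx : x = '1'
      · subst hx
        by_cases hk4 : k = 4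
        · subst hk4
          rw [show aLoop ((4 : Nat) : Int) [] ('1' :: rest) =
              '1' :: aLoop 5 [] rest by
            rw [show ((4 : Nat) : Int) = (4 : Int) by norm_num]
            rw [aLoop, if_pos ⟨rfl, by norm_num⟩, aLoop_acc]
            rfl]
          have hlist : List.replicate 4 '1' ++ '1' :: rest =
              '1' :: '1' :: '1' :: '1' :: '1' :: rest := by simp [List.replicate]
          rw [hlist, bGo, if_pos (by simp [List.take])]
          cases rest with
          | nil => simp [aLoop, bGo, List.replicate]
          | cons d ds =>
            rw [show aLoop 5 [] (d :: ds) = aLoop 0 [] ds by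
              rw [aLoop, if_neg (by intro h; omega), if_pos rfl]]
            have := ih ds (by simp at hl ⊢; omega) 0 (by omega)
            simp only [List.replicate_zero, List.nil_append, Nat.cast_zero] at this
            rw [this]
            simp [List.replicate, List.drop]
        · -- k ≤ 3: absorb the '1' into the counter
          rw [show aLoop ((k : Nat) : Int) [] ('1' :: rest) =
              '1' :: aLoop ((k + 1 : Nat) : Int) [] rest by
            rw [aLoop, if_pos ⟨rfl, by push_cast; omega⟩, aLoop_acc]
            rfl]
          have h1 : List.replicate k '1' ++ '1' :: rest =
              List.replicate (k + 1) '1' ++ rest := by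
            simp [List.replicate_succ']
          rw [h1, show List.replicate k '1' ++ '1' :: aLoop ((k + 1 : Nat) : Int) [] rest =
              List.replicate (k + 1) '1' ++ aLoop ((k + 1 : Nat) : Int) [] rest by
            simp [List.replicate_succ']]
          exact ih rest (by simp at hl ⊢; omega) (k + 1) (by omega)
      · -- non-'1' char: counter resets, char copied
        rw [show aLoop ((k : Nat) : Int) [] (x :: rest) = x :: aLoop 0 [] rest by
          rw [aLoop, if_neg (by intro h; exact hx h.1),
            if_neg (by intro h; omega), aLoop_acc]; rfl]
        rw [bGo_ones_nonone k hk x hx rest]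
        have := ih rest (by simp at hl ⊢; omega) 0 (by omega)
        simp only [List.replicate_zero, List.nil_append, Nat.cast_zero] at this
        rw [this]

-- ===== VERDICT (by name: the statement is the Claim_ definition above) =====
theorem removeFillerBits_spec : Claim_equal_removeFillerBits := by
  intro code _ _
  unfold Spec_removeFillerBits removeFillerBits removeFillerBits_alt
  have := main_lemma code.toList.length code.toList le_rfl 0 (by omega)
  simp only [List.replicate_zero, List.nil_append, Nat.cast_zero] at this
  rw [this]
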